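-- pv_equiv track=rewrite | github.com/DinoL/Parkan | stl_utils.py | generate_octahedron
-- ===== SOURCE A (Python) =====
-- def generate_octahedron(radius):
--     """Produce all octahedron vertices in an appropriate order"""
--     vertices = []
--
--     def get_vertex(i, sign):
--         vx = [0, 0, 0]
--         vx[i] = sign * radius
--         return vx
--
--     def get_starting_face(is_upper_half):
--         sign = 1 if is_upper_half else -1
--         seq = range(3)
--         if not is_upper_half:
--             seq = seq[::-1]
--         return [get_vertex(i, sign) for i in seq]
--
--     def next_face(face):
--         opp_vx = [-coordinate for coordinate in face[0]]
--         return [face[2], face[1], opp_vx]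
--
--     for is_upper_half in (True, False):
--         face = get_starting_face(is_upper_half)
--         vertices += [*face]
--         for i in range(3):
--             face = next_face(face)
--             vertices += [*face]
--
--     return vertices
-- ===== SOURCE B (Python) =====
-- def generate_octahedron(radius):
--     """Produce all octahedron vertices in an appropriate order"""
--     up = [[radius, 0, 0], [0, 0, radius], [-radius, 0, 0], [0, 0, -radius]]
--     low = up[::-1]
--     vertices = []
--     for cycle, apex in ((up, [0, radius, 0]), (low, [0, -radius, 0])):
--         for k in range(4):
--             vertices += [cycle[k], apex, cycle[(k + 1) % 4]]
--     return vertices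
-- ===== Notes on version B (the rewrite author's own statement) =====
-- stated objective: simpler
-- what changed: Replaces the stateful next_face recurrence (negating the previous face's first vertex step by step) with a direct indexed construction over two precomputed 4-point equator cycles, emitting each face as [cycle[k], apex, cycle[(k+1)%4]].
import Mathlib
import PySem

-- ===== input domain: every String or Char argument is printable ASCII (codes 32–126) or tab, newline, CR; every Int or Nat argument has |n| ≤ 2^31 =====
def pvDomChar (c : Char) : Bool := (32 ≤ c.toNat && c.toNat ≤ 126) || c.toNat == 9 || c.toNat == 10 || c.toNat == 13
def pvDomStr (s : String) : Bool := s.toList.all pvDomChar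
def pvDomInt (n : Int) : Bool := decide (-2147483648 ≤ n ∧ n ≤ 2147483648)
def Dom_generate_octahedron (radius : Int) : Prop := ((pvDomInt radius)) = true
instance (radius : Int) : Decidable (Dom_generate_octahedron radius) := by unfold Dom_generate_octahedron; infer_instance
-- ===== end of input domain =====

-- B replaces A's stateful next_face recurrence by a direct indexed build over two precomputed 4-point equator cycles (objective: simpler).

-- ===== PORT A =====
-- get_vertex: vx = [0,0,0]; vx[i] = sign*radius  (i is always 0,1,2, so List.set is exact)
def pvGetVertex (radius : Int) (i : Nat) (sign : Int) : List Int :=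
  ([0, 0, 0] : List Int).set i (sign * radius)

-- get_starting_face; seq[::-1] is list reversal
def pvStartingFace (radius : Int) (is_upper_half : Bool) : List (List Int) :=
  let sign : Int := if is_upper_half then 1 else -1
  let seq : List Nat := if is_upper_half then List.range 3 else (List.range 3).reverse
  seq.map (fun i => pvGetVertex radius i sign)

-- next_face; face always has 3 elements so getD [] is exact for face[0], face[2]
def pvNextFace (face : List (List Int)) : List (List Int) :=
  let opp_vx := (face.getD 0 []).map (fun c => -c)
  [face.getD 2 [], face.getD 1 [], opp_vx]

def generate_octahedron (radius : Int) : List (List Int) :=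
  ([true, false]).foldl
    (fun vertices is_upper_half =>
      let face := pvStartingFace radius is_upper_half
      let st := (List.range 3).foldl
        (fun (st : List (List Int) × List (List Int)) _ =>
          let f := pvNextFace st.2
          (st.1 ++ f, f))
        (vertices ++ face, face)
      st.1)
    []

-- ===== PORT B =====
def generate_octahedron_alt (radius : Int) : List (List Int) :=
  let up : List (List Int) := [[radius, 0, 0], [0, 0, radius], [-radius, 0, 0], [0, 0, -radius]]
  let low := up.reverse
  ([(up, ([0, radius, 0] : List Int)), (low, ([0, -radius, 0] : List Int))]).foldl
    (fun vertices ca =>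
      (List.range 4).foldl
        (fun v k => v ++ [ca.1.getD k [], ca.2, ca.1.getD ((k + 1) % 4) []])
        vertices)
    []

-- ===== PRECONDITION & SPEC =====
def Spec_generate_octahedron (radius : Int) (out : List (List Int)) : Prop := out = generate_octahedron_alt radius
instance (radius : Int) (out : List (List Int)) : Decidable (Spec_generate_octahedron radius out) := by unfold Spec_generate_octahedron; infer_instance

-- ===== CLAIM (what is proved, stated in full; the proofs are below) =====
def Claim_equal_generate_octahedron : Prop := ∀ (radius : Int), Dom_generate_octahedron radius → Spec_generate_octahedron radius (generate_octahedron radius)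

-- ===== LEMMAS AND PROOFS =====

-- ===== VERDICT (by name: the statement is the Claim_ definition above) =====
theorem generate_octahedron_spec : Claim_equal_generate_octahedron := by
  intro radius _
  unfold Spec_generate_octahedron generate_octahedron generate_octahedron_alt
  simp [pvStartingFace, pvNextFace, pvGetVertex, List.range_succ]
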